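-- pv_equiv track=rewrite | github.com/yeatonj/adventofcode2023 | day3/day3.py | check_adj_symbols
-- ===== SOURCE A (Python) =====
-- def check_adj_symbols(symbol_dic, start_col, end_col, row, max_row, max_col):
--     # rebuild the search area by building a rectangle around the number
--     if (start_col > 0):
--         start_col -= 1
--     if (end_col < max_col):
--         end_col += 1
--     if (row > 0):
--         start_row = row - 1
--     else:
--         start_row = row
--     if (row < max_row):
--         end_row = row + 1
--     else:
--         end_row = row
--
--     # Check for symbols in that box
--     for r in range(start_row, end_row + 1):
--         for c in range(start_col, end_col + 1):
--             if (r, c) in symbol_dic: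
--                 return True
--     return False
-- ===== SOURCE B (Python) =====
-- def check_adj_symbols(symbol_dic, start_col, end_col, row, max_row, max_col):
--     # Single pass over the symbol positions: a symbol is adjacent iff it lies
--     # inside the (edge-clamped) bounding band, expressed directly with
--     # boolean arithmetic instead of mutated clamp variables and cell loops.
--     def hits(r, c):
--         return (row - (row > 0) <= r <= row + (row < max_row)
--                 and start_col - (start_col > 0) <= c <= end_col + (end_col < max_col))
--     return any(hits(r, c) for (r, c) in symbol_dic)
-- ===== Notes on version B (the rewrite author's own statement) =====
-- stated objective: faster
-- what changed: B makes one pass over the symbol positions testing each against closed-form clamped band bounds (boolean arithmetic, any over a generator), instead of A's mutated clamp variables and nested range loops probing the symbol collection per rectangle cell.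
import Mathlib
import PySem

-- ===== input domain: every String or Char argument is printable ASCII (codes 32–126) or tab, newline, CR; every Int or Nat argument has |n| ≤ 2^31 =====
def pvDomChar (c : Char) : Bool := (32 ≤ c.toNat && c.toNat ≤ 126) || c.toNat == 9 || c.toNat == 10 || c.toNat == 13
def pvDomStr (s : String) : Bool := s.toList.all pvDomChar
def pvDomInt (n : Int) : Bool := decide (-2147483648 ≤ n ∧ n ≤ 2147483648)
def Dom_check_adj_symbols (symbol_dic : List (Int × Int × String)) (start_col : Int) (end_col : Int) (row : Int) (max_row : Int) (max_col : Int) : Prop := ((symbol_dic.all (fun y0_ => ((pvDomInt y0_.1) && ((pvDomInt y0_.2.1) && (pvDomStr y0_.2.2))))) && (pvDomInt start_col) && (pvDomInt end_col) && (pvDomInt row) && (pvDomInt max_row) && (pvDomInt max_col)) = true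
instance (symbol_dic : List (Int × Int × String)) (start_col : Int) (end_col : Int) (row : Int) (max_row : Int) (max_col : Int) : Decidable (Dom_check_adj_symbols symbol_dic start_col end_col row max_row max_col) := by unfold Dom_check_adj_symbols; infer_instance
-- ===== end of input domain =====

-- B replaces A's mutated clamp variables and nested cell-by-cell rectangle scan by a single pass over the symbol positions, testing each against closed-form clamped band bounds (alternative traversal, same result).


-- ===== PORT A =====
-- Literal port of A: clamp the box via reassigned variables, then nested range loops probing symbol_dic per cell.
def check_adj_symbols (symbol_dic : List (Int × Int × String)) (start_col : Int) (end_col : Int) (row : Int) (max_row : Int) (max_col : Int) : Bool :=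
  let start_col := if start_col > 0 then start_col - 1 else start_col
  let end_col := if end_col < max_col then end_col + 1 else end_col
  let start_row := if row > 0 then row - 1 else row
  let end_row := if row < max_row then row + 1 else row
  (PySem.List.pyRange start_row (end_row + 1) 1).any (fun r =>
    (PySem.List.pyRange start_col (end_col + 1) 1).any (fun c =>
      symbol_dic.any (fun e => e.1 == r && e.2.1 == c)))

-- ===== PORT B =====
-- Port of B: the `hits` helper with closed-form band bounds, applied once to each symbol position.
def pvHits (start_col : Int) (end_col : Int) (row : Int) (max_row : Int) (max_col : Int) (r : Int) (c : Int) : Bool :=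
  decide (row - (if row > 0 then 1 else 0) ≤ r ∧ r ≤ row + (if row < max_row then 1 else 0) ∧
          start_col - (if start_col > 0 then 1 else 0) ≤ c ∧ c ≤ end_col + (if end_col < max_col then 1 else 0))

def check_adj_symbols_alt (symbol_dic : List (Int × Int × String)) (start_col : Int) (end_col : Int) (row : Int) (max_row : Int) (max_col : Int) : Bool :=
  symbol_dic.any (fun e => pvHits start_col end_col row max_row max_col e.1 e.2.1)

-- ===== PRECONDITION & SPEC =====
def Spec_check_adj_symbols (symbol_dic : List (Int × Int × String)) (start_col : Int) (end_col : Int) (row : Int) (max_row : Int) (max_col : Int) (out : Bool) : Prop := out = check_adj_symbols_alt symbol_dic start_col end_col row max_row max_col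
instance (symbol_dic : List (Int × Int × String)) (start_col : Int) (end_col : Int) (row : Int) (max_row : Int) (max_col : Int) (out : Bool) : Decidable (Spec_check_adj_symbols symbol_dic start_col end_col row max_row max_col out) := by unfold Spec_check_adj_symbols; infer_instance

-- ===== CLAIM =====
def Claim_equal_check_adj_symbols : Prop := ∀ (symbol_dic : List (Int × Int × String)) (start_col : Int) (end_col : Int) (row : Int) (max_row : Int) (max_col : Int), Dom_check_adj_symbols symbol_dic start_col end_col row max_row max_col → Spec_check_adj_symbols symbol_dic start_col end_col row max_row max_col (check_adj_symbols symbol_dic start_col end_col row max_row max_col)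

-- ===== LEMMAS AND PROOFS =====

-- ===== VERDICT =====
theorem check_adj_symbols_spec : Claim_equal_check_adj_symbols := by
  intro symbol_dic start_col end_col row max_row max_col _
  unfold Spec_check_adj_symbols check_adj_symbols check_adj_symbols_alt pvHits
  rw [Bool.eq_iff_iff]
  simp only [List.any_eq_true, PySem.List.mem_pyRange_one,
    Bool.and_eq_true, beq_iff_eq, decide_eq_true_eq]
  constructor
  · rintro ⟨r, ⟨hr1, hr2⟩, c, ⟨hc1, hc2⟩, e, he, h1, h2⟩
    refine ⟨e, he, ?_⟩
    split_ifs at * <;> omega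
  · rintro ⟨e, he, h1, h2, h3, h4⟩
    refine ⟨e.1, ?_, e.2.1, ?_, e, he, rfl, rfl⟩ <;> (split_ifs at * <;> omega)
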